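-- pv_equiv track=rewrite | github.com/dgretton/pyhamilton | pyhamilton/ngs/loading/rendering_helpers.py | _find_poly_edge_x
-- ===== SOURCE A (Python) =====
-- from typing import Any, Dict, List, Optional, Tuple, Union
--
-- def _find_poly_edge_x(poly_points: List[Tuple[int, int]], y_min: int, y_max: int, side: str) -> Optional[int]:
--     """
--     Finds the min (for 'left') or max (for 'right') X-coordinate of the polygon
--     for all points whose Y-coordinate is between y_min and y_max.
--     """
--     relevant_x = []
--     # NOTE: This is an approximation using polygon vertices, not edges,
--     # but it is a massive improvement over using the full AABB's x1/x2.
--     for px, py in poly_points: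
--         if y_min <= py <= y_max:
--             relevant_x.append(px)
--
--     if not relevant_x:
--         return None
--
--     if side == "left":
--         return min(relevant_x)
--     elif side == "right":
--         return max(relevant_x)
--     return None
-- ===== SOURCE B (Python) =====
-- from typing import List, Optional, Tuple
--
-- def _find_poly_edge_x(poly_points: List[Tuple[int, int]], y_min: int, y_max: int, side: str) -> Optional[int]:
--     # Single pass: keep a running best x; no intermediate list, no second min/max pass.
--     if side == "left":
--         want_smaller = True
--     elif side == "right":
--         want_smaller = False
--     else:
--         return None
--     best = None
--     for px, py in poly_points:
--         if y_min <= py <= y_max: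
--             if best is None or (px < best if want_smaller else px > best):
--                 best = px
--     return best
-- ===== Notes on version B (the rewrite author's own statement) =====
-- stated objective: simpler
-- what changed: Replaces the filter-into-a-list pass followed by a separate min()/max() pass with a single scan that maintains a running best x (branching on side once, up front), naturally returning None for an empty band or an unrecognized side.
import Mathlib
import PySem

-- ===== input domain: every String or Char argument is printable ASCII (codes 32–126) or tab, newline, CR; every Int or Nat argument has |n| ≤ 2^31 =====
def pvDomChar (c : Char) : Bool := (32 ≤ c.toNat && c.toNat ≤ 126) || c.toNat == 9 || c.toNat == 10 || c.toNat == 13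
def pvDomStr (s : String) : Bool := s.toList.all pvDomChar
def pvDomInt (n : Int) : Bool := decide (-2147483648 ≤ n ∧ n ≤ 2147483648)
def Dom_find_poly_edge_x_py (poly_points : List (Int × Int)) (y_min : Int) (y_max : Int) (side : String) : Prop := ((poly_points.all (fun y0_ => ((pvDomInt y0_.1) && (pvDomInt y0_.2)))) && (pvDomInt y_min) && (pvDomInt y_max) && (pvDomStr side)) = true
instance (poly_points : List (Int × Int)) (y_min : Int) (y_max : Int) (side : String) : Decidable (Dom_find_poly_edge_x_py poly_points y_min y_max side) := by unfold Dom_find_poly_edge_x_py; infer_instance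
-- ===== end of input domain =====

-- B replaces A's filter-then-min/max two-pass with a single running-best scan (objective: simpler, O(1) extra space).
-- ===== PORT A =====
-- A: collect x of points in the y-band into relevant_x, then min/max of that list by side.
def find_poly_edge_x_py (poly_points : List (Int × Int)) (y_min : Int) (y_max : Int) (side : String) : Option Int :=
  let relevant_x : List Int :=
    poly_points.foldl (fun acc p => if y_min ≤ p.2 ∧ p.2 ≤ y_max then acc ++ [p.1] else acc) []
  if relevant_x = [] then none
  else if side = "left" then PySem.List.min? relevant_x (fun x => x)
  else if side = "right" then PySem.List.max? relevant_x (fun x => x)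
  else none

-- ===== PORT B =====
-- B: one pass keeping a running best x; branch on side once up front; no intermediate list.
def find_poly_edge_x_py_alt (poly_points : List (Int × Int)) (y_min : Int) (y_max : Int) (side : String) : Option Int :=
  if hs : side = "left" ∨ side = "right" then
    let want_smaller : Bool := side = "left"
    poly_points.foldl
      (fun (best : Option Int) p =>
        if y_min ≤ p.2 ∧ p.2 ≤ y_max then
          match best with
          | none => some p.1
          | some b => if (if want_smaller then p.1 < b else b < p.1) then some p.1 else some b
        else best)
      none
  else none

-- ===== PRECONDITION & SPEC =====
def Spec_find_poly_edge_x_py (poly_points : List (Int × Int)) (y_min : Int) (y_max : Int) (side : String) (out : Option Int) : Prop := out = find_poly_edge_x_py_alt poly_points y_min y_max side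
instance (poly_points : List (Int × Int)) (y_min : Int) (y_max : Int) (side : String) (out : Option Int) : Decidable (Spec_find_poly_edge_x_py poly_points y_min y_max side out) := by unfold Spec_find_poly_edge_x_py; infer_instance

-- ===== CLAIM (what is proved, stated in full; the proofs are below) =====
def Claim_equal_find_poly_edge_x_py : Prop := ∀ (poly_points : List (Int × Int)) (y_min : Int) (y_max : Int) (side : String), Dom_find_poly_edge_x_py poly_points y_min y_max side → Spec_find_poly_edge_x_py poly_points y_min y_max side (find_poly_edge_x_py poly_points y_min y_max side)

-- ===== LEMMAS AND PROOFS =====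

-- A's accumulator loop builds acc ++ (x-coords of the in-band points)
theorem pv_foldl_append (c : Int × Int → Prop) [DecidablePred c] (xs : List (Int × Int)) (acc : List Int) :
    xs.foldl (fun a p => if c p then a ++ [p.1] else a) acc
      = acc ++ ((xs.filter (fun p => decide (c p))).map Prod.fst) := by
  induction xs generalizing acc with
  | nil => simp
  | cons h t ih =>
    by_cases hc : c h <;> simp [hc, ih]

-- B's running-best loop, restricted to the filtered x-list, started at `some b`
theorem pv_runbest_some (w : Bool) (l : List Int) (b : Int) :
    l.foldl (fun (best : Option Int) x =>
        match best with
        | none => some x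
        | some b' => if (if w then x < b' else b' < x) then some x else some b') (some b)
      = some (l.foldl (fun b' x => if w then min b' x else max b' x) b) := by
  induction l generalizing b with
  | nil => rfl
  | cons h t ih =>
    rw [List.foldl_cons, List.foldl_cons]
    have hstep : (if (if w = true then h < b else b < h) then some h else some b)
        = some (if (if w = true then h < b else b < h) then h else b) := by
      split_ifs <;> rfl
    rw [show (match (some b : Option Int) with
        | none => some h
        | some b' => if (if w = true then h < b' else b' < h) then some h else some b')
        = some (if (if w = true then h < b else b < h) then h else b) from hstep, ih]
    congr 2
    cases w <;> [rw [max_def]; rw [min_def]] <;> split_ifs <;> omega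

-- the same loop started from `none` on a nonempty list
theorem pv_runbest_none (w : Bool) (x : Int) (t : List Int) :
    (x :: t).foldl (fun (best : Option Int) y =>
        match best with
        | none => some y
        | some b' => if (if w then y < b' else b' < y) then some y else some b') none
      = some (t.foldl (fun b' y => if w then min b' y else max b' y) x) := by
  rw [List.foldl_cons]
  exact pv_runbest_some w t x

-- B's loop over the points equals the running-best loop over the filtered x-list
theorem pv_loop_filter (c : Int × Int → Prop) [DecidablePred c] (w : Bool)
    (xs : List (Int × Int)) (st : Option Int) :
    xs.foldl (fun (best : Option Int) p =>
        if c p then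
          match best with
          | none => some p.1
          | some b => if (if w then p.1 < b else b < p.1) then some p.1 else some b
        else best) st
      = ((xs.filter (fun p => decide (c p))).map Prod.fst).foldl
          (fun (best : Option Int) x =>
            match best with
            | none => some x
            | some b => if (if w then x < b else b < x) then some x else some b) st := by
  induction xs generalizing st with
  | nil => rfl
  | cons h t ih =>
    by_cases hc : c h <;> simp [hc, ih]

-- ===== VERDICT (by name: the statement is the Claim_ definition above) =====
theorem find_poly_edge_x_py_spec : Claim_equal_find_poly_edge_x_py := by
  intro poly_points y_min y_max side _
  unfold Spec_find_poly_edge_x_py find_poly_edge_x_py find_poly_edge_x_py_alt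
  simp only []
  rw [pv_foldl_append (fun p => y_min ≤ p.2 ∧ p.2 ≤ y_max), List.nil_append]
  by_cases hs : side = "left" ∨ side = "right"
  · rw [dif_pos hs]
    rw [pv_loop_filter (fun p => y_min ≤ p.2 ∧ p.2 ≤ y_max) (decide (side = "left"))]
    cases hfilt : (poly_points.filter (fun p => decide (y_min ≤ p.2 ∧ p.2 ≤ y_max))).map Prod.fst with
    | nil => simp
    | cons x t =>
      rw [pv_runbest_none, if_neg (by simp)]
      rcases hs with h | h
      · rw [if_pos h, h, PySem.List.min?_id_cons]
        simp
      · have hne : side ≠ "left" := by rw [h]; decide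
        rw [if_neg hne, if_pos h, h, PySem.List.max?_id_cons]
        simp
  · rw [not_or] at hs
    rw [dif_neg (by simpa using hs)]
    split <;> simp [hs.1, hs.2]
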